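-- pv_equiv track=rewrite | github.com/bitmapup/prefixspanr | copper/fileprocessor.py | asciiFormater
-- ===== SOURCE A (Python) =====
-- def unsafeJoin(x, base=''):
--     """
--     Join Unsafe Strings
--
--     Extended description of function.
--
--     Parameters
--     ----------
--     x : string
--     base : string
--
--     Returns
--     -------
--     string
--        String join with the base
--     """
--     string = base
--     for i in x:
--         string += i
--     return string
--
-- def asciiFormater(asciiFile):
--     """
--     Read a database in format of Kosara Format
--
--     Extended description of function.
--
--     Parameters
--     ----------
--     asciiFile : string
--         Database in string in Kosara format
--
--     Returns
--     -------
--     List(String)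
--         Database readed in a list
--     """
--     pDB = []
--     for index, line in enumerate(asciiFile):
--         pattern = []
--         itemset = ''
--         splitLine = line.replace(' \n', '').split(' ')
--         ignore = True
--         first = True
--         counter = 0
--         for slot in splitLine:
--             if not ignore:
--                 if not counter:
--                     counter = int(slot)
--                     if first:
--                         first = False
--                     else:
--                         pattern.append(itemset[:-1]+'\0')
--                         itemset = ''
--                 else:
--                     counter -= 1
--                     itemset += slot + '|'
--             else:
--                 ignore = False
--         pDB.append((str(index) + unsafeJoin(pattern, '\0'))[:-1])
--     return pDB
-- ===== SOURCE B (Python) =====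
-- def asciiFormater(asciiFile):
--     # Pointer-based group parser: skip the sequence-name token, then repeatedly
--     # read a size token and slice that many items as one '|'-joined group.
--     # The final group is the line's end marker and is never emitted.
--     pDB = []
--     for index, line in enumerate(asciiFile):
--         tokens = line.replace(' \n', '').split(' ')[1:]
--         groups = []
--         i = 0
--         while i < len(tokens):
--             count = int(tokens[i])
--             groups.append('|'.join(tokens[i + 1:i + 1 + count]))
--             i += 1 + count
--         pDB.append('\0'.join([str(index)] + groups[:-1]))
--     return pDB
-- ===== Notes on version B (the rewrite author's own statement) =====
-- stated objective: simpler
-- what changed: Replaces A's per-token state machine (ignore/first/countdown flags with deferred flush and trailing-separator trimming) by a pointer-based parser that reads each size token, slices that many items as one group, and joins all but the last group directly; Pre_ excludes malformed lines whose size position holds a non-int token (A raises ValueError) or a negative int (B's pointer loop does not terminate there).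
-- outside the precondition, e.g. on asciiFormater(['x -1 a b']): A returns ['0'], B does not finish within the time limit; on asciiFormater(['x y']): A raises ValueError, B raises ValueError
import Mathlib
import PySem

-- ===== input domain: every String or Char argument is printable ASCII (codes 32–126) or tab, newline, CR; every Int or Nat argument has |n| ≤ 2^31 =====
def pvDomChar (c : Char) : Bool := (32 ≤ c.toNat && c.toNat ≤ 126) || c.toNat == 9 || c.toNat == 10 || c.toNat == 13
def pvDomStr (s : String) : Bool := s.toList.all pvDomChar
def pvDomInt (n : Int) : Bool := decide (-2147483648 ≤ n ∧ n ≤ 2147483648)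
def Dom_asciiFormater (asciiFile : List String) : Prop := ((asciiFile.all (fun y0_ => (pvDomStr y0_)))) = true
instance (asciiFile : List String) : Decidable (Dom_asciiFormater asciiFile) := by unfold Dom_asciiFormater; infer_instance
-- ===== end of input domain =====

-- B parses each line with an explicit pointer over the token list (read size, slice that
-- many items as one '|'-joined group, advance) instead of A's countdown/flush state
-- machine; same return value wherever A returns inside Pre_ (objective: simpler, no speed claim).

-- ===== PORT A =====
-- string work is done on `List Char` (PySem.Chars.* are the Python-exact primitives);
-- results go back to `String` with `String.ofList` at the very end.

-- helper unsafeJoin of A: string += i over the list, starting from base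
def pvUnsafeJoin (x : List (List Char)) (base : List Char) : List Char :=
  x.foldl (fun s i => s ++ i) base

-- one step of A's inner `for slot in splitLine` loop;
-- state = (pattern, itemset, ignore, first, counter)
def pvAStep (st : List (List Char) × List Char × Bool × Bool × Int) (slot : List Char) :
    List (List Char) × List Char × Bool × Bool × Int :=
  match st with
  | (pattern, itemset, ignore, first, counter) =>
    if !ignore then
      if counter = 0 then
        -- counter = int(slot): Python raises on a bad literal, excluded by Pre_;
        -- the port takes 0 there (outside Pre_ nothing is claimed)
        let c := (PySem.Int.ofChars? slot).getD 0
        if first then (pattern, itemset, false, false, c)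
        else (pattern ++ [PySem.Chars.slice itemset none (some (-1)) ++ ['\x00']], [], false, false, c)
      else (pattern, itemset ++ slot ++ ['|'], false, first, counter - 1)
    else (pattern, itemset, false, first, counter)

def asciiFormater (asciiFile : List String) : List String :=
  (PySem.List.enumerate asciiFile).foldl (fun pDB p =>
    let splitLine := PySem.Chars.splitOn (PySem.Chars.replace p.2.toList [' ', '\n'] []) [' ']
    let st := splitLine.foldl pvAStep ([], [], true, true, (0 : Int))
    pDB ++ [String.ofList (PySem.Chars.slice (PySem.Int.toChars p.1 ++ pvUnsafeJoin st.1 ['\x00'])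
              none (some (-1)))]) []

-- ===== PORT B =====
-- B's pointer loop `while i < len(tokens): count = int(tokens[i]);
-- groups.append('|'.join(tokens[i+1:i+1+count])); i += 1+count` as the obvious
-- recursion on the token list (the first token was already dropped by `[1:]`).
-- Pre_ guarantees every size token is a non-negative int literal, so `.getD 0 |>.toNat`
-- is exact there (outside Pre_ nothing is claimed).
def pvGroups : List (List Char) → List (List Char)
  | [] => []
  | c :: rest =>
    let count := ((PySem.Int.ofChars? c).getD 0).toNat
    PySem.Chars.join ['|'] (rest.take count) :: pvGroups (rest.drop count)
termination_by ts => ts.length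
decreasing_by simp

def asciiFormater_alt (asciiFile : List String) : List String :=
  (PySem.List.enumerate asciiFile).map (fun p =>
    let tokens := (PySem.Chars.splitOn (PySem.Chars.replace p.2.toList [' ', '\n'] []) [' ']).tail
    String.ofList (PySem.Chars.join ['\x00']
      (PySem.Int.toChars p.1 :: (pvGroups tokens).dropLast)))

-- ===== PRECONDITION & SPEC =====
-- Pre_ excludes exactly the malformed lines whose size position in the Kosara format
-- holds a non-int token (Python A raises ValueError there) or a negative int (B's
-- pointer loop does not terminate there, while A's value is an accident of its
-- countdown never reaching 0). In this format each size token says where the next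
-- size token sits, so 'every size position holds a non-negative int' is inherently a
-- walk over those positions; pvTokOK is that walk and nothing more (it computes no
-- groups and no output). The Nat argument only makes the recursion structural so the
-- kernel can evaluate it: it starts at the token count and each step consumes at
-- least one token, so the 0-fuel case is never reached.
def pvTokOKF : Nat → List (List Char) → Bool
  | _, [] => true
  | 0, _ :: _ => true
  | fuel + 1, c :: rest =>
    match PySem.Int.ofChars? c with
    | none => false
    | some k => if k < 0 then false else pvTokOKF fuel (rest.drop k.toNat)

def pvTokOK (ts : List (List Char)) : Bool := pvTokOKF ts.length ts

def Pre_asciiFormater (asciiFile : List String) : Prop :=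
  (asciiFile.all (fun line =>
    pvTokOK ((PySem.Chars.splitOn (PySem.Chars.replace line.toList [' ', '\n'] []) [' ']).tail))) = true

instance (asciiFile : List String) : Decidable (Pre_asciiFormater asciiFile) := by
  unfold Pre_asciiFormater; infer_instance

def pvWitness_asciiFormater : List String := ["seq1 1 a 0", "seq2 2 a b 1 c \n"]

def Spec_asciiFormater (asciiFile : List String) (out : List String) : Prop := out = asciiFormater_alt asciiFile
instance (asciiFile : List String) (out : List String) : Decidable (Spec_asciiFormater asciiFile out) := by unfold Spec_asciiFormater; infer_instance

-- ===== CLAIM (what is proved, stated in full; the proofs are below) =====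
def Claim_equal_asciiFormater : Prop := ∀ (asciiFile : List String), Dom_asciiFormater asciiFile → Pre_asciiFormater asciiFile → Spec_asciiFormater asciiFile (asciiFormater asciiFile)

-- ===== LEMMAS AND PROOFS =====

-- a larger fuel gives the same answer once it covers the token count
theorem pvTokOKF_fuel : ∀ (f g : Nat) (ts : List (List Char)),
    ts.length ≤ f → ts.length ≤ g → pvTokOKF f ts = pvTokOKF g ts := by
  intro f
  induction f with
  | zero =>
    intro g ts hf _
    have : ts = [] := List.eq_nil_of_length_eq_zero (Nat.le_zero.mp hf)
    subst this; cases g <;> simp [pvTokOKF]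
  | succ f ih =>
    intro g ts hf hg
    cases ts with
    | nil => cases g <;> simp [pvTokOKF]
    | cons c rest =>
      cases g with
      | zero => simp at hg
      | succ g =>
        simp only [pvTokOKF]
        cases PySem.Int.ofChars? c with
        | none => rfl
        | some k =>
          simp only []
          split_ifs with hk
          · rfl
          · have hd : (List.drop k.toNat rest).length ≤ rest.length := by simp
            simp only [List.length_cons] at hf hg
            exact ih g _ (by omega) (by omega)

-- itemset as A accumulates it from a list of items: each item followed by '|'
def pvBar (items : List (List Char)) : List Char :=
  (items.map (fun i => i ++ ['|'])).flatten

theorem pvBar_cons (u : List Char) (l : List (List Char)) :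
    pvBar (u :: l) = u ++ ['|'] ++ pvBar l := by
  simp [pvBar]

-- dropping the trailing '|' of the accumulated itemset is the '|'-join
theorem pvBar_dropLast (g : List (List Char)) :
    (pvBar g).dropLast = PySem.Chars.join ['|'] g := by
  induction g with
  | nil => simp [pvBar, PySem.Chars.join_nil]
  | cons u t ih =>
    cases t with
    | nil => simp [pvBar, PySem.Chars.join_singleton]
    | cons v t' =>
      rw [pvBar_cons, PySem.Chars.join_cons_cons]
      have hne : pvBar (v :: t') ≠ [] := by simp [pvBar_cons]
      rw [List.append_assoc, List.dropLast_append_of_ne_nil (by simp),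
        List.dropLast_append_of_ne_nil hne, ih]
      simp [List.append_assoc]

-- A's flush `itemset[:-1]` is '|'.join(group)
theorem pvFlush_eq (g : List (List Char)) :
    PySem.List.slice (pvBar g) none (some (-1)) = PySem.Chars.join ['|'] g := by
  rw [PySem.List.slice_to_neg_one, pvBar_dropLast]

-- consuming tokens while 0 ≤ counter: the next counter.toNat tokens join itemset
theorem pvConsume (us : List (List Char)) :
    ∀ (k : Int) (p : List (List Char)) (s : List Char), 0 ≤ k →
    us.foldl pvAStep (p, s, false, false, k) =
      if k.toNat ≤ us.length
      then (us.drop k.toNat).foldl pvAStep (p, s ++ pvBar (us.take k.toNat), false, false, 0)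
      else (p, s ++ pvBar us, false, false, k - us.length) := by
  induction us with
  | nil =>
    intro k p s hk
    simp only [List.foldl_nil, List.length_nil, List.take_nil, List.drop_nil, pvBar,
      List.map_nil, List.flatten_nil, List.append_nil, Nat.le_zero]
    split_ifs with h
    · have hk0 : k = 0 := by omega
      simp [hk0]
    · simp
  | cons u us ih =>
    intro k p s hk
    by_cases hk0 : k = 0
    · subst hk0
      simp [pvBar]
    · have hkpos : 0 < k := by omega
      simp only [List.foldl_cons, pvAStep, Bool.not_false, if_true, hk0, if_false]
      rw [ih (k - 1) p (s ++ u ++ ['|']) (by omega)]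
      have h1 : k.toNat = (k - 1).toNat + 1 := by omega
      rw [h1]
      simp only [List.length_cons, List.drop_succ_cons, List.take_succ_cons, pvBar_cons,
        Nat.add_le_add_iff_right]
      split_ifs with h2
      · simp [List.append_assoc]
      · simp only [Prod.mk.injEq, List.append_assoc, true_and]
        omega

-- the run of A's loop from a counter-boundary state, characterised by B's group parse
theorem pvRunA (n : Nat) : ∀ (ts : List (List Char)), ts.length ≤ n → pvTokOK ts = true →
    ∀ (p : List (List Char)) (items : List (List Char)),
    (ts.foldl pvAStep (p, pvBar items, false, false, 0)).1 =
      p ++ ((PySem.Chars.join ['|'] items :: pvGroups ts).dropLast).map (fun g => g ++ ['\x00']) := by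
  induction n with
  | zero =>
    intro ts h _ p items
    have hts : ts = [] := List.eq_nil_of_length_eq_zero (Nat.le_zero.mp h)
    subst hts
    simp [pvGroups]
  | succ n ih =>
    intro ts h hok p items
    cases ts with
    | nil => simp [pvGroups]
    | cons c rest =>
      simp only [pvTokOK, List.length_cons, pvTokOKF] at hok
      cases hks : PySem.Int.ofChars? c with
      | none => rw [hks] at hok; simp at hok
      | some k =>
        rw [hks] at hok
        simp only [] at hok
        split_ifs at hok with hkneg
        · have h0 : (0 : Int) ≤ k := by omega
          have hok' : pvTokOK (rest.drop k.toNat) = true := by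
            rw [pvTokOK, ← pvTokOKF_fuel rest.length _ _ (by simp [List.length_drop]) le_rfl]
            exact hok
          simp only [List.foldl_cons, pvAStep, Bool.not_false, if_true, Bool.false_eq_true,
            if_false, hks, Option.getD_some]
          rw [pvConsume rest _ _ [] h0]
          split_ifs with hle
          · rw [List.nil_append]
            have hlen : (rest.drop k.toNat).length ≤ n := by
              simp only [List.length_cons] at h
              simp only [List.length_drop]
              omega
            rw [ih _ hlen hok' _ _]
            simp [pvGroups, hks, List.dropLast_cons₂, pvFlush_eq, List.append_assoc]
          · simp only [Nat.not_le] at hle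
            have htake : rest.take k.toNat = rest := List.take_of_length_le (by omega)
            have hdrop : rest.drop k.toNat = [] := List.drop_eq_nil_of_le (by omega)
            simp [pvGroups, hks, htake, hdrop, pvFlush_eq]

-- the run of A's loop just after the ignored first token (first = true, itemset = '')
theorem pvFirstPhase (rest : List (List Char)) (hok : pvTokOK rest = true)
    (p : List (List Char)) :
    (rest.foldl pvAStep (p, [], false, true, 0)).1 =
      p ++ ((pvGroups rest).dropLast).map (fun g => g ++ ['\x00']) := by
  cases rest with
  | nil => simp [pvGroups]
  | cons c rest' =>
    simp only [pvTokOK, List.length_cons, pvTokOKF] at hok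
    cases hks : PySem.Int.ofChars? c with
    | none => rw [hks] at hok; simp at hok
    | some k =>
      rw [hks] at hok
      simp only [] at hok
      split_ifs at hok with hkneg
      · have h0 : (0 : Int) ≤ k := by omega
        have hok' : pvTokOK (rest'.drop k.toNat) = true := by
          rw [pvTokOK, ← pvTokOKF_fuel rest'.length _ _ (by simp [List.length_drop]) le_rfl]
          exact hok
        simp only [List.foldl_cons, pvAStep, Bool.not_false, if_true, hks, Option.getD_some]
        rw [pvConsume rest' _ _ [] h0]
        split_ifs with hle
        · rw [List.nil_append]
          rw [pvRunA (rest'.drop k.toNat).length _ le_rfl hok']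
          simp [pvGroups, hks]
        · simp only [Nat.not_le] at hle
          have htake : rest'.take k.toNat = rest' := List.take_of_length_le (by omega)
          have hdrop : rest'.drop k.toNat = [] := List.drop_eq_nil_of_le (by omega)
          simp [pvGroups, hks, htake, hdrop]

-- trimming the trailing NUL of the concatenation is the NUL-join
theorem pvDropLast_join (pre : List Char) (xs : List (List Char)) :
    (pre ++ ['\x00'] ++ (xs.map (fun x => x ++ ['\x00'])).flatten).dropLast =
      PySem.Chars.join ['\x00'] (pre :: xs) := by
  induction xs generalizing pre with
  | nil => simp [PySem.Chars.join_singleton]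
  | cons x t ih =>
    rw [PySem.Chars.join_cons_cons]
    rw [List.map_cons, List.flatten_cons,
      List.dropLast_append_of_ne_nil (by simp), ih x]

-- unsafeJoin from base is base ++ concatenation
theorem pvUnsafeJoin_eq (x : List (List Char)) (base : List Char) :
    pvUnsafeJoin x base = base ++ x.flatten := by
  induction x generalizing base with
  | nil => simp [pvUnsafeJoin]
  | cons a t ih =>
    simp only [pvUnsafeJoin, List.foldl_cons] at *
    rw [ih (base ++ a)]
    simp [List.append_assoc]

-- the two per-line computations agree on a well-formed line
theorem pvLineEq (idx : Int) (line : String)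
    (hok : pvTokOK ((PySem.Chars.splitOn (PySem.Chars.replace line.toList [' ', '\n'] []) [' ']).tail) = true) :
    (let splitLine := PySem.Chars.splitOn (PySem.Chars.replace line.toList [' ', '\n'] []) [' ']
     let st := splitLine.foldl pvAStep ([], [], true, true, (0 : Int))
     String.ofList (PySem.Chars.slice (PySem.Int.toChars idx ++ pvUnsafeJoin st.1 ['\x00'])
       none (some (-1)))) =
    (let tokens := (PySem.Chars.splitOn (PySem.Chars.replace line.toList [' ', '\n'] []) [' ']).tail
     String.ofList (PySem.Chars.join ['\x00']
       (PySem.Int.toChars idx :: (pvGroups tokens).dropLast))) := by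
  simp only []
  congr 1
  cases hts : PySem.Chars.splitOn (PySem.Chars.replace line.toList [' ', '\n'] []) [' '] with
  | nil =>
    simp [pvUnsafeJoin, pvGroups, PySem.Chars.join_singleton,
      PySem.Chars.slice_eq_listSlice, PySem.List.slice_to_neg_one]
  | cons t rest =>
    rw [hts] at hok
    simp only [List.tail_cons] at hok ⊢
    simp only [List.foldl_cons]
    have hstep : pvAStep ([], [], true, true, (0 : Int)) t = ([], [], false, true, 0) := rfl
    rw [hstep]
    have hpat := pvFirstPhase rest hok []
    have hpv : pvUnsafeJoin (rest.foldl pvAStep ([], [], false, true, 0)).1 ['\x00'] =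
        ['\x00'] ++ ((rest.foldl pvAStep ([], [], false, true, 0)).1).flatten :=
      pvUnsafeJoin_eq _ _
    rw [hpv, hpat, List.nil_append]
    rw [PySem.Chars.slice_eq_listSlice, PySem.List.slice_to_neg_one]
    rw [← List.append_assoc]
    exact pvDropLast_join _ _

-- ===== VERDICT (by name: the statement is the Claim_ definition above) =====
theorem asciiFormater_spec : Claim_equal_asciiFormater := by
  intro asciiFile _ hpre
  unfold Spec_asciiFormater asciiFormater asciiFormater_alt
  rw [PySem.List.foldl_append_singleton_eq_map]
  refine List.map_congr_left (fun p hp => ?_)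
  have hmem : p.2 ∈ asciiFile := by
    rcases (PySem.List.mem_enumerate_iff _ _ _).mp hp with ⟨k, hk, hpk⟩
    subst hpk
    exact List.getElem_mem hk
  unfold Pre_asciiFormater at hpre
  exact pvLineEq p.1 p.2 (by exact List.all_eq_true.mp hpre _ hmem)
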